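-- pv_equiv track=rewrite | github.com/nunquen/adventofcode_2023 | day_6/lib/utils.py | get_best_times
-- ===== SOURCE A (Python) =====
-- from typing import List
--
-- def get_best_times(
--     time: int,
--     distance: int
-- ) -> List[int]:
--     best_times = []
--
--     for t in range(time + 1):
--         if t == 0:
--             continue
--
--         speed = t
--         possible_distance = speed * (time - t)
--         if possible_distance > distance:
--             best_times.append(possible_distance)
--
--     return best_times
-- ===== SOURCE B (Python) =====
-- from typing import List
--
--
-- def _first_true(lo, hi, pred):
--     # First t in [lo, hi] with pred(t); pred is false-then-true on [lo, hi]
--     # and true at hi.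
--     while lo < hi:
--         mid = (lo + hi) // 2
--         if pred(mid):
--             hi = mid
--         else:
--             lo = mid + 1
--     return lo
--
--
-- def _last_true(lo, hi, pred):
--     # Last t in [lo, hi] with pred(t); pred is true-then-false on [lo, hi]
--     # and true at lo.
--     while lo < hi:
--         mid = (lo + hi + 1) // 2
--         if pred(mid):
--             lo = mid
--         else:
--             hi = mid - 1
--     return lo
--
--
-- def get_best_times(
--     time: int,
--     distance: int
-- ) -> List[int]:
--     if time < 1:
--         return []
--     m = time // 2
--     wins = lambda t: t * (time - t) > distance
--     if not wins(m):
--         return []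
--     lo = _first_true(1, m, wins)
--     hi = _last_true(m, time, wins)
--     return [t * (time - t) for t in range(lo, hi + 1)]
-- ===== Notes on version B (the rewrite author's own statement) =====
-- stated objective: alternative
-- what changed: Replaces A's full scan of all hold times 0..time (testing each against the record) with two binary searches that locate the first and last winning hold time of the concave distance function, then emits the winning distances directly over that interval.
import Mathlib
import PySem

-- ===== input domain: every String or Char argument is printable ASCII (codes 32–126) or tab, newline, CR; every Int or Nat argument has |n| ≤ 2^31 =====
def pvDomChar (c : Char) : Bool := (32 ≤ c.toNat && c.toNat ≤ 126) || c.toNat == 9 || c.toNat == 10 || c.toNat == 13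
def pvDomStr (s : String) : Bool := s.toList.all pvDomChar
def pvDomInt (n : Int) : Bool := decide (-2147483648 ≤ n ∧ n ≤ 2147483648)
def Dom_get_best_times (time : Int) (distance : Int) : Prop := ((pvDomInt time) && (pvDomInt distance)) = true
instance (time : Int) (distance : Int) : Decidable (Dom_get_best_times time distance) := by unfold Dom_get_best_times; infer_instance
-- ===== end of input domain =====

-- B replaces A's full scan of range(time+1) by two binary searches for the first and
-- last winning hold time and a direct pass over that interval (alternative decomposition).

-- ===== PORT A =====
def get_best_times (time : Int) (distance : Int) : List Int :=
  (PySem.List.pyRange 0 (time + 1) 1).foldl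
    (fun best_times t =>
      if t = 0 then best_times
      else
        let speed := t
        let possible_distance := speed * (time - t)
        if possible_distance > distance then best_times ++ [possible_distance]
        else best_times) []

-- ===== PORT B =====
-- B's _first_true while-loop; fuel = initial hi - lo bounds the iteration count
-- (the loop shrinks hi - lo every step), so the fuel guard only makes it total.
def firstTrue (pred : Int → Bool) : Nat → Int → Int → Int
  | 0, lo, _ => lo
  | fuel + 1, lo, hi =>
    if lo < hi then
      let mid := PySem.Int.floordiv (lo + hi) 2
      if pred mid then firstTrue pred fuel lo mid
      else firstTrue pred fuel (mid + 1) hi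
    else lo

-- B's _last_true while-loop, same fuel scheme.
def lastTrue (pred : Int → Bool) : Nat → Int → Int → Int
  | 0, lo, _ => lo
  | fuel + 1, lo, hi =>
    if lo < hi then
      let mid := PySem.Int.floordiv (lo + hi + 1) 2
      if pred mid then lastTrue pred fuel mid hi
      else lastTrue pred fuel lo (mid - 1)
    else lo

def get_best_times_alt (time : Int) (distance : Int) : List Int :=
  if time < 1 then []
  else
    let m := PySem.Int.floordiv time 2
    let wins := fun t => decide (distance < t * (time - t))
    if ¬ (wins m = true) then []
    else
      let lo := firstTrue wins (m - 1).toNat 1 m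
      let hi := lastTrue wins (time - m).toNat m time
      (PySem.List.pyRange lo (hi + 1) 1).map (fun t => t * (time - t))

-- ===== PRECONDITION & SPEC =====
def Spec_get_best_times (time : Int) (distance : Int) (out : List Int) : Prop := out = get_best_times_alt time distance
instance (time : Int) (distance : Int) (out : List Int) : Decidable (Spec_get_best_times time distance out) := by unfold Spec_get_best_times; infer_instance

-- ===== CLAIM (what is proved, stated in full; the proofs are below) =====
def Claim_equal_get_best_times : Prop := ∀ (time : Int) (distance : Int), Dom_get_best_times time distance → Spec_get_best_times time distance (get_best_times time distance)

-- ===== LEMMAS AND PROOFS =====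

-- p t = t*(time - t) is nondecreasing up to m (any m with 2m ≤ time)
theorem p_mono_left {time m a b : Int} (hm : 2 * m ≤ time) (hab : a ≤ b) (hbm : b ≤ m) :
    a * (time - a) ≤ b * (time - b) := by
  nlinarith [mul_nonneg (sub_nonneg.2 hab) (show (0:Int) ≤ time - a - b by omega)]

-- and nonincreasing from m on (any m with time ≤ 2m+1)
theorem p_mono_right {time m a b : Int} (hm : time ≤ 2 * m + 1) (hma : m ≤ a) (hab : a ≤ b) :
    b * (time - b) ≤ a * (time - a) := by
  rcases eq_or_lt_of_le hab with h | h
  · subst h; exact le_refl _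
  · nlinarith [mul_nonneg (show (0:Int) ≤ b - a by omega) (show (0:Int) ≤ a + b - time by omega)]

-- correctness of B's lower binary search: it returns the first point of [lo, hi]
-- where the (false-then-true) predicate holds, given it holds at hi
theorem firstTrue_spec (pred : Int → Bool) :
    ∀ (fuel : Nat) (lo hi : Int), lo ≤ hi → hi - lo ≤ (fuel : Int) →
    (∀ a b, lo ≤ a → a ≤ b → b ≤ hi → pred a = true → pred b = true) →
    pred hi = true →
    lo ≤ firstTrue pred fuel lo hi ∧ firstTrue pred fuel lo hi ≤ hi ∧
      pred (firstTrue pred fuel lo hi) = true ∧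
      ∀ t, lo ≤ t → t < firstTrue pred fuel lo hi → pred t = false := by
  intro fuel
  induction fuel with
  | zero =>
    intro lo hi hle hfuel _ hhi
    have : lo = hi := by simpa using le_antisymm hle (by omega)
    subst this
    refine ⟨le_refl _, le_refl _, hhi, ?_⟩
    intro t h1 h2
    simp [firstTrue] at h2
    omega
  | succ n ih =>
    intro lo hi hle hfuel hmono hhi
    by_cases hlt : lo < hi
    · have hmid := PySem.Int.floordiv_two_mid_bounds (le_of_lt hlt)
      have hmidlt : PySem.Int.floordiv (lo + hi) 2 < hi := by
        rw [PySem.Int.floordiv_eq_ediv_of_pos (by norm_num : (0:Int) < 2)]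
        omega
      set mid := PySem.Int.floordiv (lo + hi) 2 with hmiddef
      by_cases hp : pred mid = true
      · have h := ih lo mid hmid.1 (by omega)
          (fun a b ha hab hb hpa => hmono a b ha hab (le_trans hb (le_of_lt hmidlt)) hpa) hp
        have heq : firstTrue pred (n + 1) lo hi = firstTrue pred n lo mid := by
          simp only [firstTrue, ← hmiddef]
          rw [if_pos hlt, if_pos hp]
        rw [heq]
        exact ⟨h.1, le_trans h.2.1 (le_of_lt hmidlt), h.2.2.1, h.2.2.2⟩
      · have h := ih (mid + 1) hi (by omega) (by omega)
          (fun a b ha hab hb hpa => hmono a b (by omega) hab hb hpa) hhi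
        have heq : firstTrue pred (n + 1) lo hi = firstTrue pred n (mid + 1) hi := by
          simp only [firstTrue, ← hmiddef]
          rw [if_pos hlt, if_neg hp]
        rw [heq]
        refine ⟨by omega, h.2.1, h.2.2.1, ?_⟩
        intro t h1 h2
        by_cases htm : t ≤ mid
        · by_cases hpt : pred t = true
          · exact absurd (hmono t mid h1 htm (le_of_lt hmidlt) hpt) hp
          · simpa using hpt
        · exact h.2.2.2 t (by omega) h2
    · have hlohi : lo = hi := by omega
      subst hlohi
      have heq : firstTrue pred (n + 1) lo lo = lo := by
        simp only [firstTrue]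
        rw [if_neg hlt]
      rw [heq]
      exact ⟨le_refl _, le_refl _, hhi, fun t h1 h2 => by omega⟩

-- correctness of B's upper binary search: it returns the last point of [lo, hi]
-- where the (true-then-false) predicate holds, given it holds at lo
theorem lastTrue_spec (pred : Int → Bool) :
    ∀ (fuel : Nat) (lo hi : Int), lo ≤ hi → hi - lo ≤ (fuel : Int) →
    (∀ a b, lo ≤ a → a ≤ b → b ≤ hi → pred b = true → pred a = true) →
    pred lo = true →
    lo ≤ lastTrue pred fuel lo hi ∧ lastTrue pred fuel lo hi ≤ hi ∧
      pred (lastTrue pred fuel lo hi) = true ∧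
      ∀ t, lastTrue pred fuel lo hi < t → t ≤ hi → pred t = false := by
  intro fuel
  induction fuel with
  | zero =>
    intro lo hi hle hfuel _ hlo
    have : lo = hi := by omega
    subst this
    refine ⟨le_refl _, le_refl _, hlo, ?_⟩
    intro t h1 h2
    simp [lastTrue] at h1
    omega
  | succ n ih =>
    intro lo hi hle hfuel hmono hlo
    by_cases hlt : lo < hi
    · have hmidb : lo < PySem.Int.floordiv (lo + hi + 1) 2 ∧
          PySem.Int.floordiv (lo + hi + 1) 2 ≤ hi := by
        rw [PySem.Int.floordiv_eq_ediv_of_pos (by norm_num : (0:Int) < 2)]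
        omega
      set mid := PySem.Int.floordiv (lo + hi + 1) 2 with hmiddef
      by_cases hp : pred mid = true
      · have h := ih mid hi hmidb.2 (by omega)
          (fun a b ha hab hb hpb => hmono a b (by omega) hab hb hpb) hp
        have heq : lastTrue pred (n + 1) lo hi = lastTrue pred n mid hi := by
          simp only [lastTrue, ← hmiddef]
          rw [if_pos hlt, if_pos hp]
        rw [heq]
        exact ⟨by omega, h.2.1, h.2.2.1, h.2.2.2⟩
      · have h := ih lo (mid - 1) (by omega) (by omega)
          (fun a b ha hab hb hpb => hmono a b ha hab (by omega) hpb) hlo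
        have heq : lastTrue pred (n + 1) lo hi = lastTrue pred n lo (mid - 1) := by
          simp only [lastTrue, ← hmiddef]
          rw [if_pos hlt, if_neg hp]
        rw [heq]
        refine ⟨h.1, by omega, h.2.2.1, ?_⟩
        intro t h1 h2
        by_cases htm : mid ≤ t
        · by_cases hpt : pred t = true
          · exact absurd (hmono mid t (by omega) htm h2 hpt) hp
          · simpa using hpt
        · exact h.2.2.2 t h1 (by omega)
    · have hlohi : lo = hi := by omega
      subst hlohi
      have heq : lastTrue pred (n + 1) lo lo = lo := by
        simp only [lastTrue]
        rw [if_neg hlt]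
      rw [heq]
      exact ⟨le_refl _, le_refl _, hlo, fun t h1 h2 => by omega⟩

-- filtering an ascending int range by a predicate that characterises an
-- interval [lo, hi] yields exactly that interval
theorem filter_pyRange_interval (q : Int → Bool) (hi : Int) :
    ∀ (n : Nat) (a b lo : Int), b - a ≤ (n : Int) → a ≤ lo → hi < b →
    (∀ t, a ≤ t → t < b → (q t = true ↔ lo ≤ t ∧ t ≤ hi)) →
    (PySem.List.pyRange a b 1).filter q = PySem.List.pyRange lo (hi + 1) 1 := by
  intro n
  induction n with
  | zero =>
    intro a b lo hn ha hb hchar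
    rw [PySem.List.pyRange_one_eq_nil (by omega : b ≤ a),
        PySem.List.pyRange_one_eq_nil (by omega : hi + 1 ≤ lo)]
    rfl
  | succ n ih =>
    intro a b lo hn ha hb hchar
    by_cases hlohi : hi < lo
    · rw [PySem.List.pyRange_one_eq_nil (by omega : hi + 1 ≤ lo)]
      rw [List.filter_eq_nil_iff]
      intro t ht
      rw [PySem.List.mem_pyRange_one] at ht
      intro hq
      have := (hchar t ht.1 ht.2).1 hq
      omega
    · have hab : a < b := by omega
      rw [PySem.List.pyRange_one_cons hab, List.filter_cons]
      by_cases hq : q a = true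
      · have haint := (hchar a (le_refl a) (by omega)).1 hq
        have halo : a = lo := by omega
        rw [if_pos hq, PySem.List.pyRange_one_cons (by omega : lo < hi + 1), ← halo]
        congr 1
        exact ih (a + 1) b (a + 1) (by omega) (le_refl _) hb
          (fun t h1 h2 => by rw [hchar t (by omega) h2]; omega)
      · have hqa := hchar a (le_refl a) (by omega)
        have halo : a < lo := by
          rcases lt_or_ge a lo with h | h
          · exact h
          · exact absurd (hqa.2 ⟨by omega, by omega⟩) hq
        rw [if_neg hq]
        exact ih (a + 1) b lo (by omega) (by omega) hb
          (fun t h1 h2 => hchar t (by omega) h2)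

-- A's loop, closed form: the winning distances of the hold times in [0, time]
theorem get_best_times_eq_filter (time distance : Int) :
    get_best_times time distance =
      ((PySem.List.pyRange 0 (time + 1) 1).filter
          (fun t => decide (t ≠ 0) && decide (distance < t * (time - t)))).map
        (fun t => t * (time - t)) := by
  unfold get_best_times
  have hfun : (fun (best_times : List Int) (t : Int) =>
      if t = 0 then best_times
      else
        let speed := t
        let possible_distance := speed * (time - t)
        if possible_distance > distance then best_times ++ [possible_distance]
        else best_times) =
      (fun acc t =>
        if (decide (t ≠ 0) && decide (distance < t * (time - t))) = true then
          acc ++ [t * (time - t)]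
        else acc) := by
    funext acc t
    by_cases h0 : t = 0 <;> by_cases h1 : distance < t * (time - t) <;>
      simp [h0, h1, gt_iff_lt]
  rw [hfun, PySem.List.foldl_append_if]
  simp

-- the two floor-division facts about m = time // 2
theorem m_facts {time : Int} (h : 1 ≤ time) :
    0 ≤ PySem.Int.floordiv time 2 ∧ 2 * PySem.Int.floordiv time 2 ≤ time ∧
      time ≤ 2 * PySem.Int.floordiv time 2 + 1 := by
  rw [PySem.Int.floordiv_eq_ediv_of_pos (by norm_num : (0:Int) < 2)]
  omega

-- ===== VERDICT (by name: the statement is the Claim_ definition above) =====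
theorem get_best_times_spec : Claim_equal_get_best_times := by
  intro time distance _
  unfold Spec_get_best_times
  rw [get_best_times_eq_filter]
  simp only [get_best_times_alt]
  by_cases htime : time < 1
  · -- A's range is [] or [0]; t = 0 is skipped, so both sides are empty
    rw [if_pos htime]
    by_cases h0 : time < 0
    · rw [PySem.List.pyRange_one_eq_nil (by omega : time + 1 ≤ 0)]; rfl
    · have ht0 : time = 0 := by omega
      subst ht0
      rw [show PySem.List.pyRange 0 (0 + 1) 1 = [0] from rfl]
      simp [List.filter]
  · rw [if_neg htime]
    have h1 : 1 ≤ time := by omega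
    obtain ⟨hm0, hm1, hm2⟩ := m_facts h1
    set m := PySem.Int.floordiv time 2 with hmdef
    by_cases hguard : distance < m * (time - m)
    · rw [if_neg (by simpa using hguard)]
      by_cases hm0 : m = 0
      · -- time = 1: the searches run on degenerate ranges; both sides are [0]
        have htime1 : time = 1 := by omega
        subst htime1
        have hd : distance < 0 := by
          rw [hm0] at hguard
          simpa using hguard
        have hfirst : firstTrue (fun t => decide (distance < t * (1 - t)))
            ((0 : Int) - 1).toNat 1 0 = 1 := rfl
        have hlast : lastTrue (fun t => decide (distance < t * (1 - t)))
            ((1 : Int) - 0).toNat 0 1 = 1 := by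
          simp [lastTrue, hd]
        rw [show PySem.List.pyRange 0 (1 + 1) 1 = [0, 1] from rfl]
        simp only [hm0, hfirst, hlast, List.filter]
        norm_num [hd]
        rfl
      have hm1' : 1 ≤ m := by omega
      have hlospec := firstTrue_spec (fun t => decide (distance < t * (time - t)))
        (m - 1).toNat 1 m hm1' (by omega)
        (fun a b ha hab hb hpa => by
          simp only [decide_eq_true_eq] at *
          exact lt_of_lt_of_le hpa (p_mono_left hm1 hab hb))
        (by simpa using hguard)
      set lo := firstTrue (fun t => decide (distance < t * (time - t))) (m - 1).toNat 1 m
        with hlodef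
      simp only [decide_eq_true_eq, decide_eq_false_iff_not, not_lt] at hlospec
      have hhispec := lastTrue_spec (fun t => decide (distance < t * (time - t)))
        (time - m).toNat m time (by omega) (by omega)
        (fun a b ha hab hb hpb => by
          simp only [decide_eq_true_eq] at *
          exact lt_of_lt_of_le hpb (p_mono_right hm2 ha hab))
        (by simpa using hguard)
      set hiv := lastTrue (fun t => decide (distance < t * (time - t))) (time - m).toNat m time
        with hhidef
      simp only [decide_eq_true_eq, decide_eq_false_iff_not, not_lt] at hhispec
      congr 1
      exact filter_pyRange_interval _ hiv (time + 1).toNat 0 (time + 1) lo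
        (by omega) (by omega) (by omega)
        (fun t ht1 ht2 => by
          simp only [Bool.and_eq_true, decide_eq_true_eq]
          constructor
          · rintro ⟨h3, h4⟩
            constructor
            · by_contra h
              exact absurd h4 (not_lt.2 (hlospec.2.2.2 t (by omega) (by omega)))
            · by_contra h
              exact absurd h4 (not_lt.2 (hhispec.2.2.2 t (by omega) (by omega)))
          · rintro ⟨h3, h4⟩
            refine ⟨by omega, ?_⟩
            by_cases htm : t ≤ m
            · exact lt_of_lt_of_le hlospec.2.2.1 (p_mono_left hm1 h3 htm)
            · exact lt_of_lt_of_le hhispec.2.2.1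
                (p_mono_right hm2 (by omega : m ≤ t) (by omega : t ≤ hiv))
          )
    · -- no hold time beats the record: p t ≤ p m ≤ distance for all t
      rw [if_pos (by simpa using hguard)]
      have hguard' : m * (time - m) ≤ distance := by omega
      rw [show ((PySem.List.pyRange 0 (time + 1) 1).filter
          (fun t => decide (t ≠ 0) && decide (distance < t * (time - t)))) = [] from ?_]
      · rfl
      rw [List.filter_eq_nil_iff]
      intro t ht
      rw [PySem.List.mem_pyRange_one] at ht
      simp only [Bool.and_eq_true, decide_eq_true_eq, not_and]
      intro _ hlt
      by_cases htm : t ≤ m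
      · exact absurd (le_trans (p_mono_left hm1 htm (le_refl m)) hguard') (not_le.2 hlt)
      · exact absurd (le_trans (p_mono_right hm2 (le_refl m) (by omega : m ≤ t)) hguard')
          (not_le.2 hlt)
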